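-- pv_equiv track=rewrite | github.com/rlrs/dfm-sdg | sdg/packs/verifiable_reasoning/numbrix.py | _path_for_style
-- ===== SOURCE A (Python) =====
-- def _path_for_style(rows: int, cols: int, path_style: str) -> list[tuple[int, int]]:
--     if path_style == "row_snake":
--         path: list[tuple[int, int]] = []
--         for row in range(1, rows + 1):
--             values = range(1, cols + 1) if row % 2 == 1 else range(cols, 0, -1)
--             path.extend((row, col) for col in values)
--         return path
--
--     if path_style == "col_snake":
--         path = []
--         for col in range(1, cols + 1):
--             values = range(1, rows + 1) if col % 2 == 1 else range(rows, 0, -1)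
--             path.extend((row, col) for row in values)
--         return path
--
--     if path_style == "spiral":
--         path = []
--         top = 1
--         bottom = rows
--         left = 1
--         right = cols
--         while top <= bottom and left <= right:
--             path.extend((top, col) for col in range(left, right + 1))
--             top += 1
--             path.extend((row, right) for row in range(top, bottom + 1))
--             right -= 1
--             if top <= bottom:
--                 path.extend((bottom, col) for col in range(right, left - 1, -1))
--                 bottom -= 1
--             if left <= right:
--                 path.extend((row, left) for row in range(bottom, top - 1, -1))
--                 left += 1
--         return path
--
--     raise AssertionError(f"unsupported numbrix path style: {path_style}")
-- ===== SOURCE B (Python) =====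
-- def _path_for_style(rows: int, cols: int, path_style: str) -> list[tuple[int, int]]:
--     if path_style == "row_snake":
--         return [(r, c if r % 2 == 1 else cols + 1 - c)
--                 for r in range(1, rows + 1) for c in range(1, cols + 1)]
--     if path_style == "col_snake":
--         return [(r if c % 2 == 1 else rows + 1 - r, c)
--                 for c in range(1, cols + 1) for r in range(1, rows + 1)]
--     if path_style == "spiral":
--         if rows < 1 or cols < 1:
--             return []
--         path: list[tuple[int, int]] = []
--         r, c = 1, 1
--         dr, dc = 0, 1
--         a, b = cols, rows - 1
--         while a > 0:
--             for _ in range(a):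
--                 path.append((r, c))
--                 r += dr
--                 c += dc
--             # step back onto the last cell, turn clockwise, step forward
--             r -= dr
--             c -= dc
--             dr, dc = dc, -dr
--             r += dr
--             c += dc
--             a, b = b, a - 1
--         return path
--     raise AssertionError(f"unsupported numbrix path style: {path_style}")
-- ===== Notes on version B (the rewrite author's own statement) =====
-- stated objective: alternative
-- what changed: The spiral branch's layer-by-layer ring extraction with four mutable bounds is replaced by a single segment-length-driven walker (emit a segments of lengths cols, rows-1, cols-1, rows-2, ... turning clockwise after each), and each snake branch's per-row extend loop with a direction-switching range is replaced by one flat comprehension computing the reflected column/row arithmetically.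
import Mathlib
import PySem

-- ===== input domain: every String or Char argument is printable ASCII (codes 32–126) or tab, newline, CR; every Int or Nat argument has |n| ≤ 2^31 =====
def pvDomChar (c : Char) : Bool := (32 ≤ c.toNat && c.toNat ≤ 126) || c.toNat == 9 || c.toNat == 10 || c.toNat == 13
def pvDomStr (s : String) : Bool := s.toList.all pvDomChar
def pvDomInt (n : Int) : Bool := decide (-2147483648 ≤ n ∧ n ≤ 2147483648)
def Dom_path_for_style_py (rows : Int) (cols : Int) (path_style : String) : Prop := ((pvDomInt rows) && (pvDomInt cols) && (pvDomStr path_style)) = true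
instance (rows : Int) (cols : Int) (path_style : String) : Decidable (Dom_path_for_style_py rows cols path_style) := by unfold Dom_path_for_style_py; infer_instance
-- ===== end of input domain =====

-- B replaces the spiral ring-extraction with a single segment-length-driven walker and the two
-- snake branches with one flat comprehension each (objective: alternative algorithm, same cost).

-- ===== PORT A =====
-- spiral's while loop: recursion on the shrinking rectangle (top, bottom, left, right);
-- the updated `bottom`/`top+1≤bottom` and `left`/`left≤right-1` conditions are written inline
-- structural recursion on a fuel bounding the loop count (each iteration shrinks the rectangle)
def pvSpiralAF : Nat → Int → Int → Int → Int → List (Int × Int)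
  | 0, _, _, _, _ => []
  | n + 1, top, bottom, left, right =>
    if top ≤ bottom ∧ left ≤ right then
      ((PySem.List.pyRange left (right + 1) 1).map (fun c => (top, c))) ++
      ((PySem.List.pyRange (top + 1) (bottom + 1) 1).map (fun x => (x, right))) ++
      (if top + 1 ≤ bottom then
          (PySem.List.pyRange (right - 1) (left - 1) (-1)).map (fun c => (bottom, c)) else []) ++
      (if left ≤ right - 1 then
          (PySem.List.pyRange (if top + 1 ≤ bottom then bottom - 1 else bottom) top (-1)).map
            (fun x => (x, left)) else []) ++
      pvSpiralAF n (top + 1) (if top + 1 ≤ bottom then bottom - 1 else bottom)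
        (if left ≤ right - 1 then left + 1 else left) (right - 1)
    else []

def pvSpiralA (top bottom left right : Int) : List (Int × Int) :=
  pvSpiralAF ((bottom - top) + (right - left) + 2).toNat top bottom left right

def path_for_style_py (rows : Int) (cols : Int) (path_style : String) : List (Int × Int) :=
  if path_style = "row_snake" then
    (PySem.List.pyRange 1 (rows + 1) 1).foldl (fun path row =>
      path ++ ((if PySem.Int.mod row 2 = 1 then PySem.List.pyRange 1 (cols + 1) 1
                else PySem.List.pyRange cols 0 (-1)).map (fun col => (row, col)))) []
  else if path_style = "col_snake" then
    (PySem.List.pyRange 1 (cols + 1) 1).foldl (fun path col =>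
      path ++ ((if PySem.Int.mod col 2 = 1 then PySem.List.pyRange 1 (rows + 1) 1
                else PySem.List.pyRange rows 0 (-1)).map (fun row => (row, col)))) []
  else if path_style = "spiral" then
    pvSpiralA 1 rows 1 cols
  else []  -- Python raises AssertionError here; excluded by Pre_

-- ===== PORT B =====
-- 'for _ in range(a): append current; step' — a cells from (r, c) in direction (dr, dc)
def pvSeg (r c dr dc : Int) : Nat → List (Int × Int)
  | 0 => []
  | n + 1 => (r, c) :: pvSeg (r + dr) (c + dc) dr dc n

-- the walker: emit a segment of length a, step back onto the last cell, turn clockwise, step: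
-- new position = (r + dr*a - dr + dc, c + dc*a - dc + (-dr)), new direction (dc, -dr), lengths (b, a-1)
-- structural recursion on a fuel bounding the number of segments (each turn consumes one)
def pvWalkF : Nat → Int → Int → Int → Int → Int → Int → List (Int × Int)
  | 0, _, _, _, _, _, _ => []
  | n + 1, r, c, dr, dc, a, b =>
    if a ≤ 0 then []
    else
      pvSeg r c dr dc a.toNat ++
        pvWalkF n (r + dr * a - dr + dc) (c + dc * a - dc + (-dr)) dc (-dr) b (a - 1)

def pvWalk (r c dr dc a b : Int) : List (Int × Int) :=
  pvWalkF (max a 0 + max b 0).toNat r c dr dc a b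

def path_for_style_py_alt (rows : Int) (cols : Int) (path_style : String) : List (Int × Int) :=
  if path_style = "row_snake" then
    (PySem.List.pyRange 1 (rows + 1) 1).flatMap (fun r =>
      (PySem.List.pyRange 1 (cols + 1) 1).map (fun c =>
        (r, if PySem.Int.mod r 2 = 1 then c else cols + 1 - c)))
  else if path_style = "col_snake" then
    (PySem.List.pyRange 1 (cols + 1) 1).flatMap (fun c =>
      (PySem.List.pyRange 1 (rows + 1) 1).map (fun r =>
        ((if PySem.Int.mod c 2 = 1 then r else rows + 1 - r), c)))
  else if path_style = "spiral" then
    if rows < 1 ∨ cols < 1 then []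
    else pvWalk 1 1 0 1 cols (rows - 1)
  else []  -- Source B raises AssertionError here; excluded by Pre_

-- ===== PRECONDITION & SPEC =====
-- Pre_ excludes exactly the unsupported style strings, on which A raises AssertionError.
def Pre_path_for_style_py (rows : Int) (cols : Int) (path_style : String) : Prop :=
  path_style = "row_snake" ∨ path_style = "col_snake" ∨ path_style = "spiral"
instance (rows : Int) (cols : Int) (path_style : String) : Decidable (Pre_path_for_style_py rows cols path_style) := by unfold Pre_path_for_style_py; infer_instance

def pvWitness_path_for_style_py : Int × Int × String := (3, 4, "spiral")

def Spec_path_for_style_py (rows : Int) (cols : Int) (path_style : String) (out : List (Int × Int)) : Prop := out = path_for_style_py_alt rows cols path_style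
instance (rows : Int) (cols : Int) (path_style : String) (out : List (Int × Int)) : Decidable (Spec_path_for_style_py rows cols path_style out) := by unfold Spec_path_for_style_py; infer_instance

-- ===== CLAIM (what is proved, stated in full; the proofs are below) =====
def Claim_equal_path_for_style_py : Prop := ∀ (rows : Int) (cols : Int) (path_style : String), Dom_path_for_style_py rows cols path_style → Pre_path_for_style_py rows cols path_style → Spec_path_for_style_py rows cols path_style (path_for_style_py rows cols path_style)

-- ===== LEMMAS AND PROOFS =====

lemma pvSeg_eq (dr dc : Int) (n : Nat) : ∀ r c, pvSeg r c dr dc n =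
    (List.range n).map (fun (k : Nat) => ((r + dr * k, c + dc * k) : Int × Int)) := by
  induction n with
  | zero => intro r c; simp [pvSeg]
  | succ m ih =>
    intro r c
    rw [List.range_succ_eq_map]
    simp only [pvSeg, List.map_cons, List.map_map, ih]
    refine congrArg₂ List.cons (by simp) ?_
    apply List.map_congr_left
    intro k _
    simp only [Function.comp_apply]
    push_cast
    refine congrArg₂ Prod.mk (by ring) (by ring)

lemma pvWalk_pos (r c dr dc a b : Int) (h : 0 < a) :
    pvWalk r c dr dc a b = pvSeg r c dr dc a.toNat ++
      pvWalk (r + dr * a - dr + dc) (c + dc * a - dc + (-dr)) dc (-dr) b (a - 1) := by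
  unfold pvWalk
  rw [show (max a 0 + max b 0).toNat = (max b 0 + max (a - 1) 0).toNat + 1 by omega]
  rw [pvWalkF, if_neg (by omega)]

lemma pvWalk_nonpos (r c dr dc a b : Int) (h : a ≤ 0) :
    pvWalk r c dr dc a b = [] := by
  unfold pvWalk
  cases hn : (max a 0 + max b 0).toNat with
  | zero => rw [pvWalkF]
  | succ n => rw [pvWalkF, if_pos h]

lemma pvSpiralAF_neg (n : Nat) (t b l r : Int) (h : ¬ (t ≤ b ∧ l ≤ r)) :
    pvSpiralAF n t b l r = [] := by
  cases n with
  | zero => rw [pvSpiralAF]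
  | succ n => rw [pvSpiralAF, if_neg h]

lemma pvSpiralAF_irrel : ∀ (n m : Nat) (t b l r : Int),
    ((b - t) + (r - l) + 2).toNat ≤ n → ((b - t) + (r - l) + 2).toNat ≤ m →
    pvSpiralAF n t b l r = pvSpiralAF m t b l r := by
  intro n
  induction n with
  | zero =>
    intro m t b l r hn hm
    have hg : ¬ (t ≤ b ∧ l ≤ r) := by omega
    rw [pvSpiralAF_neg _ _ _ _ _ hg, pvSpiralAF_neg _ _ _ _ _ hg]
  | succ n ih =>
    intro m t b l r hn hm
    by_cases hg : t ≤ b ∧ l ≤ r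
    · cases m with
      | zero => omega
      | succ m =>
        rw [pvSpiralAF, pvSpiralAF, if_pos hg, if_pos hg]
        refine congrArg₂ _ rfl ?_
        apply ih
        · split_ifs <;> omega
        · split_ifs <;> omega
    · rw [pvSpiralAF_neg _ _ _ _ _ hg, pvSpiralAF_neg _ _ _ _ _ hg]

lemma pvSpiralA_neg (t b l r : Int) (h : ¬ (t ≤ b ∧ l ≤ r)) :
    pvSpiralA t b l r = [] := pvSpiralAF_neg _ _ _ _ _ h

lemma pvSpiralA_pos (t b l r : Int) (h : t ≤ b ∧ l ≤ r) :
    pvSpiralA t b l r =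
      ((PySem.List.pyRange l (r + 1) 1).map (fun c => (t, c))) ++
      ((PySem.List.pyRange (t + 1) (b + 1) 1).map (fun x => (x, r))) ++
      (if t + 1 ≤ b then
          (PySem.List.pyRange (r - 1) (l - 1) (-1)).map (fun c => (b, c)) else []) ++
      (if l ≤ r - 1 then
          (PySem.List.pyRange (if t + 1 ≤ b then b - 1 else b) t (-1)).map
            (fun x => (x, l)) else []) ++
      pvSpiralA (t + 1) (if t + 1 ≤ b then b - 1 else b)
        (if l ≤ r - 1 then l + 1 else l) (r - 1) := by
  unfold pvSpiralA
  rw [show ((b - t) + (r - l) + 2).toNat = ((b - t) + (r - l) + 1).toNat + 1 by omega]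
  rw [pvSpiralAF, if_pos h]
  refine congrArg₂ _ rfl ?_
  apply pvSpiralAF_irrel
  · split_ifs <;> omega
  · split_ifs <;> omega

lemma seg_right (t l m : Int) : pvSeg t l 0 1 m.toNat =
    (PySem.List.pyRange l (l + m) 1).map (fun c => (t, c)) := by
  rw [pvSeg_eq, PySem.List.pyRange_one, List.map_map]
  rw [show l + m - l = m by ring]
  apply List.map_congr_left
  intro k _
  simp only [Function.comp_apply]
  refine congrArg₂ Prod.mk (by ring) (by ring)

lemma seg_down (r c m : Int) : pvSeg r c 1 0 m.toNat =
    (PySem.List.pyRange r (r + m) 1).map (fun x => (x, c)) := by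
  rw [pvSeg_eq, PySem.List.pyRange_one, List.map_map]
  rw [show r + m - r = m by ring]
  apply List.map_congr_left
  intro k _
  simp only [Function.comp_apply]
  refine congrArg₂ Prod.mk (by ring) (by ring)

lemma seg_left (r c m : Int) : pvSeg r c 0 (-1) m.toNat =
    (PySem.List.pyRange c (c - m) (-1)).map (fun x => (r, x)) := by
  rw [pvSeg_eq, PySem.List.pyRange_neg_one, List.map_map]
  rw [show c - (c - m) = m by ring]
  apply List.map_congr_left
  intro k _
  simp only [Function.comp_apply]
  refine congrArg₂ Prod.mk (by ring) (by ring)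

lemma seg_up (r c m : Int) : pvSeg r c (-1) 0 m.toNat =
    (PySem.List.pyRange r (r - m) (-1)).map (fun x => (x, c)) := by
  rw [pvSeg_eq, PySem.List.pyRange_neg_one, List.map_map]
  rw [show r - (r - m) = m by ring]
  apply List.map_congr_left
  intro k _
  simp only [Function.comp_apply]
  refine congrArg₂ Prod.mk (by ring) (by ring)

lemma snake_row_eq (rows cols : Int) :
    (PySem.List.pyRange 1 (rows + 1) 1).foldl (fun path row =>
      path ++ ((if PySem.Int.mod row 2 = 1 then PySem.List.pyRange 1 (cols + 1) 1
                else PySem.List.pyRange cols 0 (-1)).map (fun col => (row, col)))) [] =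
    (PySem.List.pyRange 1 (rows + 1) 1).flatMap (fun r =>
      (PySem.List.pyRange 1 (cols + 1) 1).map (fun c =>
        (r, if PySem.Int.mod r 2 = 1 then c else cols + 1 - c))) := by
  rw [PySem.List.foldl_append_eq_flatMap]
  rw [List.nil_append]
  apply List.flatMap_congr
  intro r _
  by_cases h : PySem.Int.mod r 2 = 1
  · rw [if_pos h]
    apply List.map_congr_left
    intro c _
    rw [if_pos h]
  · rw [if_neg h]
    rw [PySem.List.pyRange_neg_one, PySem.List.pyRange_one, List.map_map, List.map_map]
    rw [show cols - (0:Int) = cols by ring, show cols + 1 - 1 = cols by ring]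
    apply List.map_congr_left
    intro k _
    simp only [Function.comp_apply, if_neg h]
    refine congrArg₂ Prod.mk rfl (by ring)

lemma snake_col_eq (rows cols : Int) :
    (PySem.List.pyRange 1 (cols + 1) 1).foldl (fun path col =>
      path ++ ((if PySem.Int.mod col 2 = 1 then PySem.List.pyRange 1 (rows + 1) 1
                else PySem.List.pyRange rows 0 (-1)).map (fun row => (row, col)))) [] =
    (PySem.List.pyRange 1 (cols + 1) 1).flatMap (fun c =>
      (PySem.List.pyRange 1 (rows + 1) 1).map (fun r =>
        ((if PySem.Int.mod c 2 = 1 then r else rows + 1 - r), c))) := by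
  rw [PySem.List.foldl_append_eq_flatMap]
  rw [List.nil_append]
  apply List.flatMap_congr
  intro c _
  by_cases h : PySem.Int.mod c 2 = 1
  · rw [if_pos h]
    apply List.map_congr_left
    intro r _
    rw [if_pos h]
  · rw [if_neg h]
    rw [PySem.List.pyRange_neg_one, PySem.List.pyRange_one, List.map_map, List.map_map]
    rw [show rows - (0:Int) = rows by ring, show rows + 1 - 1 = rows by ring]
    apply List.map_congr_left
    intro k _
    simp only [Function.comp_apply, if_neg h]
    refine congrArg₂ Prod.mk (by ring) rfl

lemma spiral_eq_walk : ∀ (n : Nat) (top bottom left right : Int),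
    ((bottom - top) + (right - left)).toNat < n → top ≤ bottom →
    pvSpiralA top bottom left right =
      pvWalk top left 0 1 (right - left + 1) (bottom - top) := by
  intro n
  induction n with
  | zero => intro t b l r hm ht; omega
  | succ n ih =>
    intro t b l r hm ht
    by_cases hlr : l ≤ r
    · -- unfold one ring of A
      rw [pvSpiralA_pos _ _ _ _ ⟨ht, hlr⟩]
      -- walk level 1: the top row, left → right
      rw [pvWalk_pos _ _ _ _ _ _ (by omega : (0:Int) < r - l + 1)]
      have w1seg : pvSeg t l 0 1 (r - l + 1).toNat =
          (PySem.List.pyRange l (r + 1) 1).map (fun c => (t, c)) := by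
        rw [seg_right]; rw [show l + (r - l + 1) = r + 1 by ring]
      rw [w1seg]
      rw [show t + 0 * (r - l + 1) - 0 + 1 = t + 1 by ring,
          show l + 1 * (r - l + 1) - 1 + -(0:Int) = r by ring, neg_zero]
      by_cases htb : t + 1 ≤ b
      · -- walk level 2: the right column, down
        rw [pvWalk_pos _ _ _ _ _ _ (by omega : (0:Int) < b - t)]
        have w2seg : pvSeg (t + 1) r 1 0 (b - t).toNat =
            (PySem.List.pyRange (t + 1) (b + 1) 1).map (fun x => (x, r)) := by
          rw [seg_down]; rw [show t + 1 + (b - t) = b + 1 by ring]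
        rw [w2seg]
        rw [show t + 1 + 1 * (b - t) - 1 + 0 = b by ring,
            show r + 0 * (b - t) - 0 + -(1:Int) = r - 1 by ring]
        rw [if_pos htb, if_pos htb]
        by_cases hlr1 : l ≤ r - 1
        · -- walk level 3: the bottom row, right → left
          rw [if_pos hlr1, if_pos hlr1]
          rw [pvWalk_pos _ _ _ _ _ _ (by omega : (0:Int) < r - l + 1 - 1)]
          have w3seg : pvSeg b (r - 1) 0 (-1) (r - l + 1 - 1).toNat =
              (PySem.List.pyRange (r - 1) (l - 1) (-1)).map (fun c => (b, c)) := by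
            rw [seg_left]; rw [show r - 1 - (r - l + 1 - 1) = l - 1 by ring]
          rw [w3seg]
          rw [show b + 0 * (r - l + 1 - 1) - 0 + -(1:Int) = b - 1 by ring,
              show r - 1 + -1 * (r - l + 1 - 1) - -1 + -(0:Int) = l by ring, neg_zero]
          by_cases hb2 : t + 1 ≤ b - 1
          · -- walk level 4: the left column, up
            rw [pvWalk_pos _ _ _ _ _ _ (by omega : (0:Int) < b - t - 1)]
            have w4seg : pvSeg (b - 1) l (-1) 0 (b - t - 1).toNat =
                (PySem.List.pyRange (b - 1) t (-1)).map (fun x => (x, l)) := by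
              rw [seg_up]; rw [show b - 1 - (b - t - 1) = t by ring]
            rw [w4seg]
            rw [show b - 1 + -1 * (b - t - 1) - -1 + (0:Int) = t + 1 by ring,
                show l + 0 * (b - t - 1) - 0 + -(-1:Int) = l + 1 by ring, neg_neg]
            rw [ih (t + 1) (b - 1) (l + 1) (r - 1) (by omega) (by omega)]
            rw [show (r - 1 : Int) - (l + 1) + 1 = r - l + 1 - 1 - 1 by ring,
                show (b - 1 : Int) - (t + 1) = b - t - 1 - 1 by ring]
            simp [List.append_assoc]
          · -- two rows only: b = t + 1, the fourth segment and the recursion are empty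
            rw [pvWalk_nonpos _ _ _ _ _ _ (by omega : b - t - 1 ≤ 0)]
            rw [PySem.List.pyRange_neg_one_eq_nil (by omega : b - 1 ≤ t)]
            rw [pvSpiralA_neg _ _ _ _ (by omega)]
            simp
        · -- single column: l = r, the third segment and the recursion are empty
          rw [if_neg hlr1, if_neg hlr1]
          rw [pvWalk_nonpos _ _ _ _ _ _ (by omega : r - l + 1 - 1 ≤ 0)]
          rw [PySem.List.pyRange_neg_one_eq_nil (by omega : r - 1 ≤ l - 1)]
          rw [pvSpiralA_neg _ _ _ _ (by omega)]
          simp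
      · -- single row: t = b
        have htb' : t = b := by omega
        rw [pvWalk_nonpos _ _ _ _ _ _ (by omega : b - t ≤ 0)]
        rw [if_neg htb, if_neg htb]
        rw [pvSpiralA_neg _ _ _ _ (by omega)]
        have : PySem.List.pyRange (t + 1) (b + 1) 1 = [] :=
          PySem.List.pyRange_one_eq_nil (by omega)
        rw [this]
        have h4 : (if l ≤ r - 1 then
            (PySem.List.pyRange b t (-1)).map (fun x => (x, l)) else ([] : List (Int × Int))) = [] := by
          split_ifs with h
          · rw [PySem.List.pyRange_neg_one_eq_nil (by omega)]; rfl
          · rfl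
        rw [h4]
        simp
    · rw [pvSpiralA_neg _ _ _ _ (by omega)]
      rw [pvWalk_nonpos _ _ _ _ _ _ (by omega : r - l + 1 ≤ 0)]

-- ===== VERDICT (by name: the statement is the Claim_ definition above) =====
theorem path_for_style_py_spec : Claim_equal_path_for_style_py := by
  intro rows cols path_style _ hpre
  unfold Spec_path_for_style_py path_for_style_py path_for_style_py_alt
  rcases hpre with h | h | h <;> subst h <;> simp only [reduceIte, String.reduceEq]
  · exact snake_row_eq rows cols
  · exact snake_col_eq rows cols
  · by_cases hr : rows < 1 ∨ cols < 1
    · rw [if_pos hr, pvSpiralA_neg _ _ _ _ (by omega)]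
    · push_neg at hr
      rw [if_neg (by omega : ¬ (rows < 1 ∨ cols < 1))]
      have := spiral_eq_walk (((rows - 1) + (cols - 1)).toNat + 1) 1 rows 1 cols (by omega) (by omega)
      simpa using this
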